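-- pv_equiv track=rewrite | github.com/no6est/market-observer | app/enrichers/echo_chamber.py | _find_url_references
-- ===== SOURCE A (Python) =====
-- from typing import Any
--
-- def _find_url_references(articles: list[dict[str, Any]]) -> dict[str, set[str]]:
--     """Find cross-references between articles by checking URL appearances.
--
--     For each article, checks whether any other article's URL appears in
--     its summary or body text, indicating the article references (echoes)
--     that other source.
--
--     Args:
--         articles: List of article dicts, each expected to have at least
--             a ``url`` key and optionally ``summary`` and ``body`` keys.
--
--     Returns:
--         Mapping of article URL to set of other article URLs that appear
--         in its summary/body.
--     """
--     references: dict[str, set[str]] = {}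
--
--     # Collect all article URLs
--     article_urls: list[str] = []
--     for article in articles:
--         url = article.get("url") or ""
--         if url:
--             article_urls.append(url)
--
--     for article in articles:
--         url = article.get("url") or ""
--         if not url:
--             continue
--
--         text = " ".join([
--             article.get("summary") or "",
--             article.get("body") or "",
--         ]).lower()
--
--         if not text.strip():
--             references[url] = set()
--             continue
--
--         refs: set[str] = set()
--         for other_url in article_urls:
--             if other_url == url:
--                 continue
--             if other_url.lower() in text:
--                 refs.add(other_url)
--
--         references[url] = refs
--
--     return references
-- ===== SOURCE B (Python) =====
-- def _find_url_references(articles):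
--     """Multi-pattern matching by substring enumeration: put the lowered URLs in a
--     hash set, collect their distinct lengths, and scan each text ONCE, testing at
--     each position only the substrings whose length is a pattern length against the
--     set -- instead of testing every other URL against every text."""
--     references = {}
--     urls = [a.get("url") or "" for a in articles]
--     urls = [u for u in urls if u]
--     patterns = {u.lower() for u in urls}
--     lengths = sorted({len(p) for p in patterns})
--     for article in articles:
--         url = article.get("url") or ""
--         if not url:
--             continue
--         text = " ".join([
--             article.get("summary") or "",
--             article.get("body") or "",
--         ]).lower()
--         if not text.strip():
--             references[url] = set()
--             continue
--         n = len(text)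
--         found = set()
--         for i in range(n):
--             for L in lengths:
--                 if i + L > n:
--                     break
--                 sub = text[i:i + L]
--                 if sub in patterns:
--                     found.add(sub)
--         references[url] = {u for u in urls if u != url and u.lower() in found}
--     return references
-- ===== Notes on version B (the rewrite author's own statement) =====
-- stated objective: alternative
-- what changed: B replaces the per-pair 'url in text' scans by set-based multi-pattern matching: it builds a hash set of the lowered URLs and their sorted distinct lengths once, scans each text a single time testing each substring of a pattern length against the set, and then reads each article's references off the found-set.
import Mathlib
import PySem

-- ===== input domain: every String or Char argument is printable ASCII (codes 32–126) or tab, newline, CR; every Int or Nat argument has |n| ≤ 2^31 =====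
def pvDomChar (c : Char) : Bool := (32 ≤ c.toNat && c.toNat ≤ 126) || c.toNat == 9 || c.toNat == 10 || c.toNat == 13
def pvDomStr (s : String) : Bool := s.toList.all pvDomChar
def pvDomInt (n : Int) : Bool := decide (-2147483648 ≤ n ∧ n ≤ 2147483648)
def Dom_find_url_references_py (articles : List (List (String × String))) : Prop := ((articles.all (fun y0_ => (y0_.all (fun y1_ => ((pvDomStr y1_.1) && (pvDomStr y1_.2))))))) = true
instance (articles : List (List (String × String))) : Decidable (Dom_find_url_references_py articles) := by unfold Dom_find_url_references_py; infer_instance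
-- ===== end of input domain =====

-- B replaces A's per-pair substring scans by set-based multi-pattern matching (hash set of the
-- lowered URLs + their distinct lengths, one scan per text); same return value, not claimed faster.

-- shared input decoding: article.get(k) or ""  (values are strings, so 'or ""' maps a missing key, like an empty value, to "")
def pvGetStr (article : List (String × String)) (k : String) : String :=
  (PySem.Dict.mk article).getD k ""

-- ' '.join([article.get("summary") or "", article.get("body") or ""]).lower()
def pvText (article : List (String × String)) : String :=
  PySem.Str.lower (PySem.Str.join " " [pvGetStr article "summary", pvGetStr article "body"])

-- ===== PORT A =====
def find_url_references_py (articles : List (List (String × String))) : List (String × List String) :=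
  let article_urls : List String := articles.foldl (fun acc article =>
    if pvGetStr article "url" ≠ "" then acc ++ [pvGetStr article "url"] else acc) []
  let references : PySem.Dict String (List String) := articles.foldl (fun refs article =>
    let url := pvGetStr article "url"
    if url = "" then refs
    else
      let text := pvText article
      if PySem.Str.strip text = "" then refs.insert url (PySem.Set.empty : PySem.Set String)
      else
        refs.insert url (article_urls.foldl (fun r other_url =>
          if other_url = url then r
          else if PySem.Str.isIn (PySem.Str.lower other_url) text then PySem.Set.add r other_url
          else r) (PySem.Set.empty : PySem.Set String))) PySem.Dict.empty
  references.items

-- ===== PORT B =====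
-- inner scan step at text position i: 'for L in lengths: if i+L>n: break; sub=text[i:i+L];
-- if sub in patterns: found.add(sub)' — the leading break is the takeWhile prefix of lengths
def pvScanStep (patterns : PySem.Set String) (text : String) (n : Int) (lengths : List Int)
    (f : PySem.Set String) (i : Int) : PySem.Set String :=
  (lengths.takeWhile (fun L => decide (i + L ≤ n))).foldl (fun f L =>
    if PySem.Set.contains patterns (PySem.Str.slice text (some i) (some (i + L))) then
      PySem.Set.add f (PySem.Str.slice text (some i) (some (i + L)))
    else f) f

def find_url_references_py_alt (articles : List (List (String × String))) : List (String × List String) :=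
  let urls : List String :=
    (articles.map (fun a => pvGetStr a "url")).filter (fun u => decide (u ≠ ""))
  let patterns : PySem.Set String := PySem.Set.ofList (urls.map PySem.Str.lower)
  let lengths : List Int :=
    PySem.List.sorted (PySem.Set.ofList (patterns.map PySem.Str.len)) (fun x => x) false
  (articles.foldl (fun (refs : PySem.Dict String (List String)) article =>
    let url := pvGetStr article "url"
    if url = "" then refs
    else
      let text := pvText article
      if PySem.Str.strip text = "" then refs.insert url (PySem.Set.empty : PySem.Set String)
      else
        let n := PySem.Str.len text
        let found := (PySem.List.pyRange 0 n 1).foldl (pvScanStep patterns text n lengths)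
          (PySem.Set.empty : PySem.Set String)
        refs.insert url (urls.foldl (fun s u =>
          if u ≠ url ∧ PySem.Set.contains found (PySem.Str.lower u) then PySem.Set.add s u else s)
          (PySem.Set.empty : PySem.Set String))) PySem.Dict.empty).items

-- ===== PRECONDITION & SPEC =====
def Spec_find_url_references_py (articles : List (List (String × String))) (out : List (String × List String)) : Prop := out = find_url_references_py_alt articles
instance (articles : List (List (String × String))) (out : List (String × List String)) : Decidable (Spec_find_url_references_py articles out) := by unfold Spec_find_url_references_py; infer_instance

-- ===== CLAIM (what is proved, stated in full; the proofs are below) =====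
def Claim_equal_find_url_references_py : Prop := ∀ (articles : List (List (String × String))), Dom_find_url_references_py articles → Spec_find_url_references_py articles (find_url_references_py articles)

-- ===== LEMMAS AND PROOFS =====

-- membership in a 'if p b: s.add(g b)' fold
theorem pv_mem_foldl_add_if {β : Type} (l : List β) (p : β → Bool) (g : β → String)
    (s : PySem.Set String) (y : String) :
    y ∈ l.foldl (fun s b => if p b then PySem.Set.add s (g b) else s) s
      ↔ y ∈ s ∨ ∃ b ∈ l, p b = true ∧ y = g b := by
  induction l generalizing s with
  | nil => simp
  | cons b t ih =>
    simp only [List.foldl_cons]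
    by_cases h : p b = true
    · rw [ih]; simp [PySem.Set.mem_add, h]; tauto
    · rw [ih]; simp [h]

-- membership in the whole scan
theorem pv_mem_scan (patterns : PySem.Set String) (text : String) (n : Int) (lengths : List Int)
    (idxs : List Int) (f0 : PySem.Set String) (y : String) :
    y ∈ idxs.foldl (pvScanStep patterns text n lengths) f0
      ↔ y ∈ f0 ∨ ∃ i ∈ idxs, ∃ L ∈ lengths.takeWhile (fun L => decide (i + L ≤ n)),
          PySem.Set.contains patterns (PySem.Str.slice text (some i) (some (i + L))) = true ∧
          y = PySem.Str.slice text (some i) (some (i + L)) := by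
  induction idxs generalizing f0 with
  | nil => simp
  | cons i t ih =>
    simp only [List.foldl_cons, ih, List.mem_cons]
    rw [pvScanStep, pv_mem_foldl_add_if]
    constructor
    · rintro (((h | ⟨L, hL, hc, hy⟩) | ⟨j, hj, L, hL, hc, hy⟩))
      · exact Or.inl h
      · exact Or.inr ⟨i, Or.inl rfl, L, hL, hc, hy⟩
      · exact Or.inr ⟨j, Or.inr hj, L, hL, hc, hy⟩
    · rintro (h | ⟨j, (rfl | hj), L, hL, hc, hy⟩)
      · exact Or.inl (Or.inl h)
      · exact Or.inl (Or.inr ⟨L, hL, hc, hy⟩)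
      · exact Or.inr ⟨j, hj, L, hL, hc, hy⟩

-- on an ascending list an antitone takeWhile is a filter
theorem pv_takeWhile_antitone (l : List Int) (hl : l.Pairwise (· ≤ ·)) (n i : Int) :
    l.takeWhile (fun L => decide (i + L ≤ n)) = l.filter (fun L => decide (i + L ≤ n)) := by
  induction l with
  | nil => rfl
  | cons a t ih =>
    rcases List.pairwise_cons.mp hl with ⟨ha, ht⟩
    by_cases h : i + a ≤ n
    · simp only [List.takeWhile_cons, List.filter_cons, decide_eq_true h, if_true]
      rw [ih ht]
    · have hfa : List.filter (fun L => decide (i + L ≤ n)) t = [] := by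
        rw [List.filter_eq_nil_iff]
        intro b hb
        have := ha b hb
        simp only [decide_eq_true_eq]
        omega
      simp [h, hfa]

-- a two-sided slice is an infix
theorem pv_slice_infix {α : Type} (xs : List α) (a b : Int) (ha : 0 ≤ a) (hb : 0 ≤ b) :
    PySem.List.slice xs (some a) (some b) <:+: xs := by
  rw [PySem.List.slice_toNat xs ha hb]
  exact ((List.take_prefix _ _).isInfix).trans ((List.drop_suffix _ _).isInfix)

-- core: the scan's found-set contains a nonempty pattern q iff q occurs in the text
theorem pv_found_iff (text : String) (patterns : PySem.Set String) (lengths : List Int)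
    (q : String)
    (hsort : lengths.Pairwise (· ≤ ·)) (hpos : ∀ L ∈ lengths, 0 ≤ L)
    (hq : q ∈ patterns) (hlen : PySem.Str.len q ∈ lengths) (hne : q.toList ≠ []) :
    q ∈ (PySem.List.pyRange 0 (PySem.Str.len text) 1).foldl
          (pvScanStep patterns text (PySem.Str.len text) lengths)
          (PySem.Set.empty : PySem.Set String)
      ↔ PySem.Str.isIn q text = true := by
  rw [pv_mem_scan]
  constructor
  · rintro (h | ⟨i, hi, L, hL, hc, rfl⟩)
    · exact absurd h (by simp [PySem.Set.empty])
    · have hi' := PySem.List.mem_pyRange_one.mp hi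
      have hLmem : L ∈ lengths := (List.takeWhile_prefix _).subset hL
      have hL0 : 0 ≤ L := hpos L hLmem
      rw [PySem.Str.isIn_iff_infix, PySem.Str.toList_slice]
      simp only [PySem.Chars.slice_eq_listSlice]
      exact pv_slice_infix _ i (i + L) hi'.1 (by omega)
  · intro hin
    have hinf : ∃ j, q.toList <+: text.toList.drop j := by
      rw [PySem.Chars.exists_prefix_drop_iff_isIn]
      simpa using hin
    obtain ⟨j, hj⟩ := hinf
    have hql : 1 ≤ q.toList.length := by
      cases hq' : q.toList with
      | nil => exact absurd hq' hne
      | cons c cs => simp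
    have hjlen : q.toList.length ≤ text.toList.length - j := by
      have := hj.length_le
      simpa [List.length_drop] using this
    have hjlt : j < text.toList.length := by omega
    refine Or.inr ⟨(j : Int), ?_, (q.toList.length : Int), ?_, ?_, ?_⟩
    · rw [PySem.List.mem_pyRange_one]
      constructor
      · exact_mod_cast Nat.zero_le j
      · rw [PySem.Str.len_eq]; exact_mod_cast hjlt
    · rw [pv_takeWhile_antitone lengths hsort, List.mem_filter]
      refine ⟨by rw [PySem.Str.len_eq] at hlen; exact_mod_cast hlen, ?_⟩
      rw [PySem.Str.len_eq]
      simp only [decide_eq_true_eq]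
      push_cast
      omega
    · have hslice : PySem.Str.slice text (some (j : Int)) (some ((j : Int) + (q.toList.length : Int))) = q := by
        apply String.toList_inj.mp
        rw [PySem.Str.toList_slice]
        simp only [PySem.Chars.slice_eq_listSlice]
        rw [PySem.List.slice_natCast_add]
        exact (List.prefix_iff_eq_take.mp hj).symm
      rw [hslice]
      exact (PySem.Set.contains_iff patterns q).mpr hq
    · have hslice : PySem.Str.slice text (some (j : Int)) (some ((j : Int) + (q.toList.length : Int))) = q := by
        apply String.toList_inj.mp
        rw [PySem.Str.toList_slice]
        simp only [PySem.Chars.slice_eq_listSlice]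
        rw [PySem.List.slice_natCast_add]
        exact (List.prefix_iff_eq_take.mp hj).symm
      exact hslice.symm

-- proof-side abbreviations: the two loop bodies with the url list, url and text abstracted out
def pvPatterns (U : List String) : PySem.Set String := PySem.Set.ofList (U.map PySem.Str.lower)

def pvLengths (U : List String) : List Int :=
  PySem.List.sorted (PySem.Set.ofList ((pvPatterns U).map PySem.Str.len)) (fun x => x) false

def pvBodyA (U : List String) (url text : String)
    (refs : PySem.Dict String (List String)) : PySem.Dict String (List String) :=
  if url = "" then refs
  else
    if PySem.Str.strip text = "" then refs.insert url (PySem.Set.empty : PySem.Set String)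
    else
      refs.insert url (U.foldl (fun r other_url =>
        if other_url = url then r
        else if PySem.Str.isIn (PySem.Str.lower other_url) text then PySem.Set.add r other_url
        else r) (PySem.Set.empty : PySem.Set String))

def pvBodyB (U : List String) (url text : String)
    (refs : PySem.Dict String (List String)) : PySem.Dict String (List String) :=
  if url = "" then refs
  else
    if PySem.Str.strip text = "" then refs.insert url (PySem.Set.empty : PySem.Set String)
    else
      refs.insert url (U.foldl (fun s u =>
        if u ≠ url ∧ PySem.Set.contains
            ((PySem.List.pyRange 0 (PySem.Str.len text) 1).foldl
              (pvScanStep (pvPatterns U) text (PySem.Str.len text) (pvLengths U))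
              (PySem.Set.empty : PySem.Set String)) (PySem.Str.lower u)
          then PySem.Set.add s u else s)
        (PySem.Set.empty : PySem.Set String))

-- the two bodies agree whenever every candidate url is nonempty
theorem pv_body_eq (U : List String) (hU : ∀ o ∈ U, o ≠ "") (url text : String)
    (refs : PySem.Dict String (List String)) :
    pvBodyA U url text refs = pvBodyB U url text refs := by
  unfold pvBodyA pvBodyB
  by_cases hu : url = ""
  · simp [hu]
  · by_cases hs : PySem.Str.strip text = ""
    · simp [hu, hs]
    · simp only [hu, hs, ne_eq, not_false_eq_true, if_false]
      congr 1
      apply PySem.List.foldl_congr_mem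
      intro r o ho
      have hsort : (pvLengths U).Pairwise (· ≤ ·) := PySem.List.sorted_pairwise _ (fun x => x)
      have hpos : ∀ L ∈ pvLengths U, 0 ≤ L := by
        intro L hL
        rw [pvLengths, PySem.List.mem_sorted, PySem.Set.mem_ofList] at hL
        obtain ⟨p, _, rfl⟩ := List.mem_map.mp hL
        rw [PySem.Str.len_eq]
        exact_mod_cast Nat.zero_le _
      have hq : PySem.Str.lower o ∈ pvPatterns U :=
        (PySem.Set.mem_ofList _ _).mpr (List.mem_map_of_mem ho)
      have hlen : PySem.Str.len (PySem.Str.lower o) ∈ pvLengths U := by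
        rw [pvLengths, PySem.List.mem_sorted, PySem.Set.mem_ofList]
        exact List.mem_map_of_mem hq
      have hne : (PySem.Str.lower o).toList ≠ [] := by
        rw [PySem.Str.toList_lower]
        simp [PySem.Chars.lower]
        intro hnil
        exact hU o ho (String.toList_inj.mp (by simp [hnil]))
      have hiff := pv_found_iff text (pvPatterns U) (pvLengths U) (PySem.Str.lower o)
        hsort hpos hq hlen hne
      have hc : PySem.Set.contains ((PySem.List.pyRange 0 (PySem.Str.len text) 1).foldl
            (pvScanStep (pvPatterns U) text (PySem.Str.len text) (pvLengths U))
            (PySem.Set.empty : PySem.Set String)) (PySem.Str.lower o)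
          = PySem.Str.isIn (PySem.Str.lower o) text := by
        by_cases hb : PySem.Str.isIn (PySem.Str.lower o) text = true
        · rw [hb]
          exact (PySem.Set.contains_iff _ _).mpr (hiff.mpr hb)
        · have hbf : PySem.Str.isIn (PySem.Str.lower o) text = false := by
            revert hb; cases PySem.Str.isIn (PySem.Str.lower o) text <;> simp
          rw [hbf, ← Bool.not_eq_true]
          intro hct
          exact hb (hiff.mp ((PySem.Set.contains_iff _ _).mp hct))
      by_cases ho' : o = url
      · simp [ho']
      · simp only [ho', if_false, not_false_eq_true, true_and, hc]

-- ===== VERDICT (by name: the statement is the Claim_ definition above) =====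
set_option maxHeartbeats 1000000 in
theorem find_url_references_py_spec : Claim_equal_find_url_references_py := by
  intro articles _
  unfold Spec_find_url_references_py
  have hA : find_url_references_py articles
      = (articles.foldl (fun refs article => pvBodyA (articles.foldl (fun acc article =>
          if pvGetStr article "url" ≠ "" then acc ++ [pvGetStr article "url"] else acc) [])
          (pvGetStr article "url") (pvText article) refs)
          PySem.Dict.empty).items := rfl
  have hB : find_url_references_py_alt articles
      = (articles.foldl (fun refs article => pvBodyB ((articles.map (fun a => pvGetStr a "url")).filter
          (fun u => decide (u ≠ ""))) (pvGetStr article "url") (pvText article) refs)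
          PySem.Dict.empty).items := rfl
  have hUA : articles.foldl (fun acc article =>
      if pvGetStr article "url" ≠ "" then acc ++ [pvGetStr article "url"] else acc) []
      = (articles.map (fun a => pvGetStr a "url")).filter (fun u => decide (u ≠ "")) := by
    rw [PySem.List.foldl_append_ite (fun a => pvGetStr a "url" ≠ "") (fun a => pvGetStr a "url")]
    rw [List.filter_map]
    rfl
  rw [hA, hB, hUA]
  have hU : ∀ o ∈ (articles.map (fun a => pvGetStr a "url")).filter (fun u => decide (u ≠ "")),
      o ≠ "" := by
    intro o ho
    have := (List.mem_filter.mp ho).2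
    simpa using this
  refine congrArg PySem.Dict.items ?_
  exact PySem.List.foldl_congr_mem _ _ _ _ (fun refs a _ => pv_body_eq _ hU _ _ refs)
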